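-- pv_equiv track=rewrite | github.com/panindra1/Email-spam-classification | categoryClassification.py | give_class_val
-- ===== SOURCE A (Python) =====
-- def give_class_val(class_values):
--     index = 0
--     value = 0
--     i = 0
--     for val in class_values:
--         if(value > val):
--             value = val
--             index = i
--         i += 1
--
--     return index
-- ===== SOURCE B (Python) =====
-- def give_class_val(class_values):
--     if not class_values:
--         return 0
--     mn = min(class_values)
--     if mn < 0:
--         return class_values.index(mn)
--     return 0
-- ===== Notes on version B (the rewrite author's own statement) =====
-- stated objective: simpler
-- what changed: Replaces A's manual single-loop index/value/counter tracking with a two-pass library decomposition: compute min(class_values), then return its first index if it is negative, else 0.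
import Mathlib
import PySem

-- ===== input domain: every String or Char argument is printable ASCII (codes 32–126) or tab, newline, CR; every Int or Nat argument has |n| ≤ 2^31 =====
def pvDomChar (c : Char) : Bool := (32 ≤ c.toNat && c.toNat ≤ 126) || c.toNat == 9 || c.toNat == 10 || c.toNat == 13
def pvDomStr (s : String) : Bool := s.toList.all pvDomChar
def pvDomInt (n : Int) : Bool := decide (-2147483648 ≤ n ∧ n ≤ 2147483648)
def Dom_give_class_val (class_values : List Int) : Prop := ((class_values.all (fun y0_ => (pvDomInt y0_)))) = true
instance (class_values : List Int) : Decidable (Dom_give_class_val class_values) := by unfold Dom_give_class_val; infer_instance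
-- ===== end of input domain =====

-- B replaces A's manual index/value/counter loop with a two-pass min-then-locate decomposition (simpler; same return value).

-- ===== PORT A =====
-- A's loop state: (index, value, i), updated exactly as the Python loop does.
def give_class_val (class_values : List Int) : Int :=
  (class_values.foldl
    (fun (st : Int × Int × Int) val =>
      if st.2.1 > val then (st.2.2, val, st.2.2 + 1) else (st.1, st.2.1, st.2.2 + 1))
    (0, 0, 0)).1

-- ===== PORT B =====
def give_class_val_alt (class_values : List Int) : Int :=
  match PySem.List.min? class_values (fun x => x) with
  | none => 0
  | some mn => if mn < 0 then (((PySem.List.index? class_values mn).getD 0 : Nat) : Int) else 0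

-- ===== PRECONDITION & SPEC =====
def Spec_give_class_val (class_values : List Int) (out : Int) : Prop := out = give_class_val_alt class_values
instance (class_values : List Int) (out : Int) : Decidable (Spec_give_class_val class_values out) := by unfold Spec_give_class_val; infer_instance

-- ===== CLAIM (what is proved, stated in full; the proofs are below) =====
def Claim_equal_give_class_val : Prop := ∀ (class_values : List Int), Dom_give_class_val class_values → Spec_give_class_val class_values (give_class_val class_values)

-- ===== LEMMAS AND PROOFS =====

theorem foldl_min_pullout : ∀ (t : List Int) (a b : Int), t.foldl min (min a b) = min a (t.foldl min b) := by
  intro t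
  induction t with
  | nil => intro a b; rfl
  | cons x s ih =>
    intro a b
    simp only [List.foldl_cons]
    rw [min_assoc, ih]

theorem loop_char : ∀ (xs : List Int) (idx v i : Int),
    (xs.foldl
      (fun (st : Int × Int × Int) val =>
        if st.2.1 > val then (st.2.2, val, st.2.2 + 1) else (st.1, st.2.1, st.2.2 + 1))
      (idx, v, i)).1 =
    if xs.foldl min v < v then i + (((xs.idxOf? (xs.foldl min v)).getD 0 : Nat) : Int) else idx := by
  intro xs
  induction xs with
  | nil => intro idx v i; simp
  | cons x t ih =>
    intro idx v i
    simp only [List.foldl_cons]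
    by_cases hvx : v > x
    · rw [if_pos hvx]
      rw [ih]
      have hmin : min v x = x := by omega
      rw [hmin]
      have hM : t.foldl min x ≤ x := (PySem.List.foldl_min_le t x).1
      have hcond : t.foldl min x < v := lt_of_le_of_lt hM hvx
      rw [if_pos hcond]
      by_cases hlt : t.foldl min x < x
      · rw [if_pos hlt]
        have hmem : t.foldl min x ∈ t := by
          rcases PySem.List.foldl_min_mem t x with h | h
          · omega
          · exact h
        have hne : (x == t.foldl min x) = false := by
          simp only [beq_eq_false_iff_ne, ne_eq]; omega
        rw [List.idxOf?_cons, if_neg (by simp [hne])]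
        obtain ⟨k, hk⟩ := Option.isSome_iff_exists.mp (List.isSome_idxOf? .. |>.mpr hmem)
        rw [hk]
        simp only [Option.map_some, Option.getD_some]
        push_cast
        ring
      · rw [if_neg hlt]
        have hx : t.foldl min x = x := le_antisymm hM (by omega)
        rw [hx, List.idxOf?_cons]
        simp
    · rw [if_neg hvx]
      rw [ih]
      have hmin : min v x = v := by omega
      rw [hmin]
      by_cases hc : t.foldl min v < v
      · rw [if_pos hc, if_pos hc]
        have hmem : t.foldl min v ∈ t := by
          rcases PySem.List.foldl_min_mem t v with h | h
          · omega
          · exact h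
        have hne : (x == t.foldl min v) = false := by
          simp only [beq_eq_false_iff_ne, ne_eq]; omega
        rw [List.idxOf?_cons, if_neg (by simp [hne])]
        obtain ⟨k, hk⟩ := Option.isSome_iff_exists.mp (List.isSome_idxOf? .. |>.mpr hmem)
        rw [hk]
        simp only [Option.map_some, Option.getD_some]
        push_cast
        ring
      · rw [if_neg hc, if_neg hc]

-- ===== VERDICT (by name: the statement is the Claim_ definition above) =====
theorem give_class_val_spec : Claim_equal_give_class_val := by
  unfold Claim_equal_give_class_val Spec_give_class_val
  intro xs _
  unfold give_class_val give_class_val_alt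
  rw [loop_char]
  cases xs with
  | nil => simp [PySem.List.min?]
  | cons x t =>
    rw [PySem.List.min?_id_cons]
    simp only [List.foldl_cons]
    have hpull : t.foldl min (min 0 x) = min 0 (t.foldl min x) := foldl_min_pullout t 0 x
    rw [hpull]
    by_cases hneg : t.foldl min x < 0
    · have h0 : min 0 (t.foldl min x) = t.foldl min x := by omega
      rw [h0, if_pos hneg, if_pos hneg, PySem.List.index?_eq_idxOf?]
      simp
    · have h0 : min 0 (t.foldl min x) = (0 : Int) := by omega
      rw [h0, if_neg (by omega : ¬ (0:Int) < 0), if_neg hneg]
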